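-- pv_equiv track=rewrite | github.com/dmonzonis/advent-of-code-2017 | day24/day24.py | find_strongest_longest
-- ===== SOURCE A (Python) =====
-- class Bridge:
--     """Represents a bridge of magnetic pieces.
--
--     Holds information about available pieces to construct the bridge, current pieces used
--     in the bridge and the available port of the last piece in the bridge."""
--
--     def __init__(self, available, bridge=[], port=0):
--         """Initialize bridge variables."""
--         self.available = available
--         self.bridge = bridge
--         self.port = port
--
--     def strength(self):
--         """Return the strength of the current bridge."""
--         return sum([sum([port for port in piece]) for piece in self.bridge])
--
--     def fitting_pieces(self):
--         """Return a list of pieces that can be used to extend the current bridge."""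
--         return [piece for piece in self.available if self.port in piece]
--
--     def add_piece(self, piece):
--         """Return a new bridge with the piece added to it and removed from the available list."""
--         new_bridge = self.bridge + [piece]
--         # The new port is the unmatched port in the added piece
--         new_port = piece[0] if piece[1] == self.port else piece[1]
--         new_available = self.available[:]
--         new_available.remove(piece)
--         return Bridge(new_available, new_bridge, new_port)
--
-- def find_strongest_longest(pieces):
--     """Find strongest bridge from the longest bridges constructable with a list of pieces."""
--     max_strength = max_length = 0
--     queue = [Bridge(pieces)]
--     while queue:
--         bridge = queue.pop(0)
--         fitting = bridge.fitting_pieces()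
--         if not fitting:
--             length = len(bridge.bridge)
--             if length > max_length:
--                 max_length = length
--                 max_strength = bridge.strength()
--             elif length == max_length:
--                 strength = bridge.strength()
--                 if strength > max_strength:
--                     max_strength = strength
--                     max_length = length
--             continue
--
--         for piece in fitting:
--             queue.append(bridge.add_piece(piece))
--
--     return max_strength
-- ===== SOURCE B (Python) =====
-- def find_strongest_longest(pieces):
--     """Find strongest bridge from the longest bridges constructable with a list of pieces.
--
--     Depth-first recursion returning the best (length, strength) extension for a given
--     remaining-pieces list and open port, instead of a breadth-first queue of bridges."""
--     def best(avail, port):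
--         res = (0, 0)
--         for a, b in avail:
--             if a == port or b == port:
--                 rest = avail.copy()
--                 rest.remove((a, b))
--                 l, s = best(rest, a if b == port else b)
--                 res = max(res, (l + 1, s + a + b))
--         return res
--     return best(pieces, 0)[1]
-- ===== Notes on version B (the rewrite author's own statement) =====
-- stated objective: alternative
-- what changed: Replaced the breadth-first queue of whole Bridge objects by a direct depth-first recursion best(avail, port) that returns the lexicographic maximum (length, strength) pair over all maximal chains.
import Mathlib
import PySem

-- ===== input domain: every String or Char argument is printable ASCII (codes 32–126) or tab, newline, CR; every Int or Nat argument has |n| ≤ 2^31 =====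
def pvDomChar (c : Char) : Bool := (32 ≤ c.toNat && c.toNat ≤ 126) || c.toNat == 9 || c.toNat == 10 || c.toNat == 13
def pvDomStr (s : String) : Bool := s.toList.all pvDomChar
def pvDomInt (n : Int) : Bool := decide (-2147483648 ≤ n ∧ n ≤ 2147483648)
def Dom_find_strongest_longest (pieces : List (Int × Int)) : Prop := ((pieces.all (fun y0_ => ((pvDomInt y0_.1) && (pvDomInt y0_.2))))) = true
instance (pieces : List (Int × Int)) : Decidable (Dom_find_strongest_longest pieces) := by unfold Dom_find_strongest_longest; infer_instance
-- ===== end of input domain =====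

-- B replaces A's breadth-first queue of Bridge objects by a direct depth-first
-- recursion returning the best (length, strength) pair (objective: alternative).

-- ===== PORT A =====
-- the Bridge class: available pieces, pieces used so far, open port
structure PvBridge where
  available : List (Int × Int)
  bridge : List (Int × Int)
  port : Int
deriving Repr, DecidableEq

-- Bridge.strength: sum([sum([port for port in piece]) for piece in self.bridge])
def pvStrength (bridge : List (Int × Int)) : Int :=
  (bridge.map (fun piece => piece.1 + piece.2)).sum

-- Bridge.fitting_pieces: [piece for piece in self.available if self.port in piece]
def pvFitting (br : PvBridge) : List (Int × Int) :=
  br.available.filter (fun piece => piece.1 == br.port || piece.2 == br.port)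

-- Bridge.add_piece: new bridge with piece appended, removed (first occurrence) from available
def pvAddPiece (br : PvBridge) (piece : Int × Int) : PvBridge :=
  ⟨br.available.erase piece, br.bridge ++ [piece],
   if piece.2 == br.port then piece.1 else piece.2⟩

-- termination measure for the BFS queue: Σ (|available|+1)!
def pvMeasure (queue : List PvBridge) : Nat :=
  (queue.map (fun br => (br.available.length + 1).factorial)).sum

-- used by pvLoopA's decreasing_by
theorem pv_children_measure_lt (br : PvBridge) (h : (pvFitting br).isEmpty = false) :
    pvMeasure ((pvFitting br).map (fun piece => pvAddPiece br piece)) < (br.available.length + 1).factorial := by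
  have hsub : ∀ x ∈ pvFitting br, x ∈ br.available := fun x hx => List.mem_of_mem_filter hx
  have hne : pvFitting br ≠ [] := by simpa [List.isEmpty_iff] using h
  have hlen : (pvFitting br).length ≤ br.available.length := List.length_filter_le _ _
  obtain ⟨x0, hx0⟩ := List.exists_mem_of_ne_nil _ hne
  have hpos : 1 ≤ br.available.length := List.length_pos_of_mem (hsub x0 hx0)
  unfold pvMeasure
  rw [List.map_map]
  have hmap : (pvFitting br).map ((fun br' => (br'.available.length + 1).factorial) ∘ fun piece => pvAddPiece br piece)
      = (pvFitting br).map (fun _ => (br.available.length).factorial) := by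
    refine List.map_congr_left (fun x hx => ?_)
    have := List.length_erase_of_mem (hsub x hx)
    simp only [Function.comp, pvAddPiece, this]
    congr 1
    omega
  rw [hmap, List.map_const', List.sum_replicate, smul_eq_mul]
  calc (pvFitting br).length * (br.available.length).factorial
      ≤ br.available.length * (br.available.length).factorial :=
        Nat.mul_le_mul_right _ hlen
    _ < (br.available.length + 1) * (br.available.length).factorial := by
        have := Nat.factorial_pos br.available.length
        exact Nat.mul_lt_mul_of_lt_of_le (by omega) (le_refl _) this
    _ = (br.available.length + 1).factorial := (Nat.factorial_succ _).symm

-- the while-queue loop of find_strongest_longest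
def pvLoopA (queue : List PvBridge) (maxLen maxStr : Int) : Int :=
  match queue with
  | [] => maxStr
  | br :: rest =>
    if (pvFitting br).isEmpty then
      let length : Int := br.bridge.length
      if length > maxLen then
        pvLoopA rest length (pvStrength br.bridge)
      else if length == maxLen then
        let s := pvStrength br.bridge
        if s > maxStr then pvLoopA rest length s
        else pvLoopA rest maxLen maxStr
      else pvLoopA rest maxLen maxStr
    else
      pvLoopA (rest ++ (pvFitting br).map (fun piece => pvAddPiece br piece)) maxLen maxStr
termination_by pvMeasure queue
decreasing_by
  · simp only [pvMeasure, List.map_cons, List.sum_cons]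
    have := Nat.factorial_pos (br.available.length + 1)
    omega
  · simp only [pvMeasure, List.map_cons, List.sum_cons]
    have := Nat.factorial_pos (br.available.length + 1)
    omega
  · simp only [pvMeasure, List.map_cons, List.sum_cons]
    have := Nat.factorial_pos (br.available.length + 1)
    omega
  · simp only [pvMeasure, List.map_cons, List.sum_cons]
    have := Nat.factorial_pos (br.available.length + 1)
    omega
  · have hlt := pv_children_measure_lt br (by simpa using ‹¬ (pvFitting br).isEmpty = true›)
    simp only [pvMeasure, List.map_cons, List.sum_cons, List.map_append, List.sum_append] at hlt ⊢
    omega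

def find_strongest_longest (pieces : List (Int × Int)) : Int :=
  pvLoopA [⟨pieces, [], 0⟩] 0 0

-- ===== PORT B =====
-- Python's max on two int pairs (lexicographic, first argument kept on ties)
def pvMax (p q : Int × Int) : Int × Int :=
  if p.1 < q.1 ∨ (p.1 = q.1 ∧ p.2 < q.2) then q else p

-- best(avail, port): best (length, strength) over all maximal chains from `port`
def pvBest (avail : List (Int × Int)) (port : Int) : Int × Int :=
  avail.attach.foldl (fun res x =>
    if x.1.1 == port || x.1.2 == port then
      let ls := pvBest (avail.erase x.1) (if x.1.2 == port then x.1.1 else x.1.2)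
      pvMax res (ls.1 + 1, ls.2 + x.1.1 + x.1.2)
    else res) (0, 0)
termination_by avail.length
decreasing_by
  have h1 := List.length_erase_of_mem x.2
  have h2 := List.length_pos_of_mem x.2
  omega

def find_strongest_longest_alt (pieces : List (Int × Int)) : Int :=
  (pvBest pieces 0).2

-- ===== PRECONDITION & SPEC =====
def Spec_find_strongest_longest (pieces : List (Int × Int)) (out : Int) : Prop := out = find_strongest_longest_alt pieces
instance (pieces : List (Int × Int)) (out : Int) : Decidable (Spec_find_strongest_longest pieces out) := by unfold Spec_find_strongest_longest; infer_instance

-- ===== CLAIM (what is proved, stated in full; the proofs are below) =====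
def Claim_equal_find_strongest_longest : Prop := ∀ (pieces : List (Int × Int)), Dom_find_strongest_longest pieces → Spec_find_strongest_longest pieces (find_strongest_longest pieces)

-- ===== LEMMAS AND PROOFS =====

-- proof-side helpers
def pvLe (p q : Int × Int) : Prop := p.1 < q.1 ∨ (p.1 = q.1 ∧ p.2 ≤ q.2)

def pvShift (c p : Int × Int) : Int × Int := (c.1 + p.1, c.2 + p.2)

def pvCand (avail : List (Int × Int)) (port : Int) (x : Int × Int) : Int × Int :=
  ((pvBest (avail.erase x) (if x.2 == port then x.1 else x.2)).1 + 1,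
   (pvBest (avail.erase x) (if x.2 == port then x.1 else x.2)).2 + x.1 + x.2)

-- (length, strength) of the best maximal completion of a bridge state
def pvTotal (br : PvBridge) : Int × Int :=
  ((br.bridge.length : Int) + (pvBest br.available br.port).1,
   pvStrength br.bridge + (pvBest br.available br.port).2)

theorem pvMax_rc (a b c : Int × Int) : pvMax (pvMax a b) c = pvMax (pvMax a c) b := by
  obtain ⟨a1, a2⟩ := a; obtain ⟨b1, b2⟩ := b; obtain ⟨c1, c2⟩ := c
  simp only [pvMax]
  split_ifs <;> first | rfl | (simp_all only [Prod.mk.injEq]; omega)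

theorem pvMax_assoc (a b c : Int × Int) : pvMax (pvMax a b) c = pvMax a (pvMax b c) := by
  obtain ⟨a1, a2⟩ := a; obtain ⟨b1, b2⟩ := b; obtain ⟨c1, c2⟩ := c
  simp only [pvMax]
  split_ifs <;> first | rfl | (simp_all only [Prod.mk.injEq]; omega)

theorem pvLe_max_left (a c : Int × Int) : pvLe a (pvMax a c) := by
  obtain ⟨a1, a2⟩ := a; obtain ⟨c1, c2⟩ := c
  simp only [pvMax, pvLe]
  split_ifs <;> omega

theorem pvLe_trans {a b c : Int × Int} (h1 : pvLe a b) (h2 : pvLe b c) : pvLe a c := by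
  obtain ⟨a1, a2⟩ := a; obtain ⟨b1, b2⟩ := b; obtain ⟨c1, c2⟩ := c
  simp only [pvLe] at *
  omega

theorem pv_foldl_le {α : Type} (h : α → Int × Int) (l : List α) :
    ∀ a : Int × Int, pvLe a (l.foldl (fun r x => pvMax r (h x)) a) := by
  induction l with
  | nil => intro a; simp only [List.foldl_nil]; obtain ⟨a1, a2⟩ := a; simp [pvLe]
  | cons y ys ih =>
    intro a
    simp only [List.foldl_cons]
    exact pvLe_trans (pvLe_max_left a (h y)) (ih _)

theorem pvMax_zero_of_pos (c : Int × Int) (h : 1 ≤ c.1) : pvMax (0, 0) c = c := by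
  simp only [pvMax]
  rw [if_pos]
  left
  simpa using h

theorem pvMax_zero_snd (p : Int × Int) (h : pvLe (0, 0) p) : (pvMax (0, 0) p).2 = p.2 := by
  obtain ⟨p1, p2⟩ := p
  simp only [pvMax, pvLe] at *
  split_ifs <;> first | rfl | (simp only []; omega)

theorem pvShift_max (c p q : Int × Int) :
    pvShift c (pvMax p q) = pvMax (pvShift c p) (pvShift c q) := by
  obtain ⟨c1, c2⟩ := c; obtain ⟨p1, p2⟩ := p; obtain ⟨q1, q2⟩ := q
  simp only [pvMax, pvShift]
  split_ifs <;> first | rfl | (simp_all only [Prod.mk.injEq]; omega)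

theorem pv_foldl_shift {α : Type} (h : α → Int × Int) (c : Int × Int) (l : List α) :
    ∀ b : Int × Int,
      l.foldl (fun r x => pvMax r (pvShift c (h x))) (pvShift c b)
        = pvShift c (l.foldl (fun r x => pvMax r (h x)) b) := by
  induction l with
  | nil => intro b; rfl
  | cons y ys ih =>
    intro b
    simp only [List.foldl_cons]
    rw [← pvShift_max, ih]

theorem pv_foldl_hoist {α : Type} (h : α → Int × Int) (l : List α) :
    ∀ a b : Int × Int,
      l.foldl (fun r x => pvMax r (h x)) (pvMax a b)
        = pvMax a (l.foldl (fun r x => pvMax r (h x)) b) := by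
  induction l with
  | nil => intro a b; rfl
  | cons y ys ih =>
    intro a b
    simp only [List.foldl_cons]
    rw [pvMax_assoc, ih]

theorem pv_foldl_perm {α β : Type} (f : β → α → β)
    (hc : ∀ b a1 a2, f (f b a1) a2 = f (f b a2) a1)
    {l1 l2 : List α} (h : l1.Perm l2) : ∀ b, l1.foldl f b = l2.foldl f b := by
  induction h with
  | nil => intro b; rfl
  | cons x _ ih => intro b; simp only [List.foldl_cons]; exact ih _
  | swap x y l => intro b; simp only [List.foldl_cons]; rw [hc]
  | trans _ _ ih1 ih2 => intro b; rw [ih1, ih2]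

-- pvBest as a plain fold over the fitting pieces
theorem pvBest_eq (avail : List (Int × Int)) (port : Int) :
    pvBest avail port
      = (avail.filter (fun x => x.1 == port || x.2 == port)).foldl
          (fun res x => pvMax res (pvCand avail port x)) (0, 0) := by
  rw [pvBest]
  refine Eq.trans (List.foldl_attach (l := avail) (b := ((0 : Int), (0 : Int)))
    (f := fun res x => if (x.1 == port || x.2 == port) = true then
        pvMax res ((pvBest (avail.erase x) (if (x.2 == port) = true then x.1 else x.2)).1 + 1,
          (pvBest (avail.erase x) (if (x.2 == port) = true then x.1 else x.2)).2 + x.1 + x.2)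
      else res)) ?_
  rw [List.foldl_filter]
  exact List.foldl_ext _ _ _ (fun a x _ => by
    by_cases h : (x.1 == port || x.2 == port) = true <;> simp [h, pvCand])

theorem pvBest_nonneg (avail : List (Int × Int)) (port : Int) :
    pvLe (0, 0) (pvBest avail port) := by
  rw [pvBest_eq]
  exact pv_foldl_le _ _ _

theorem pvBest_no_fit (avail : List (Int × Int)) (port : Int)
    (h : avail.filter (fun x => x.1 == port || x.2 == port) = []) :
    pvBest avail port = (0, 0) := by
  rw [pvBest_eq, h]
  rfl

theorem pvStrength_append (l : List (Int × Int)) (x : Int × Int) :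
    pvStrength (l ++ [x]) = pvStrength l + (x.1 + x.2) := by
  simp [pvStrength]

-- the fold over a bridge's children equals one update with the bridge's own total
theorem pv_children_fold (br : PvBridge) (acc : Int × Int)
    (hne : pvFitting br ≠ []) :
    ((pvFitting br).map (fun piece => pvAddPiece br piece)).foldl
        (fun a b => pvMax a (pvTotal b)) acc
      = pvMax acc (pvTotal br) := by
  have hsub : ∀ x ∈ pvFitting br, x ∈ br.available := fun x hx => List.mem_of_mem_filter hx
  set c : Int × Int := ((br.bridge.length : Int), pvStrength br.bridge) with hc
  have htot : ∀ x ∈ pvFitting br,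
      pvTotal (pvAddPiece br x) = pvShift c (pvCand br.available br.port x) := by
    intro x hx
    simp only [pvTotal, pvAddPiece, pvCand, pvShift, hc, pvStrength_append,
      List.length_append, List.length_cons, List.length_nil]
    simp only [Prod.mk.injEq]
    constructor <;> (push_cast; ring)
  rw [List.foldl_map]
  have hcongr : (pvFitting br).foldl (fun a x => pvMax a (pvTotal (pvAddPiece br x))) acc
      = (pvFitting br).foldl (fun a x => pvMax a (pvShift c (pvCand br.available br.port x))) acc :=
    List.foldl_ext _ _ _ (fun a x hx => by rw [htot x hx])
  rw [hcongr]
  have hbr : pvTotal br = pvShift c (pvBest br.available br.port) := by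
    simp only [pvTotal, pvShift, hc]
  rw [hbr, pvBest_eq]
  obtain ⟨y, ys, hys⟩ : ∃ y ys, pvFitting br = y :: ys := by
    cases h : pvFitting br with
    | nil => exact absurd h hne
    | cons y ys => exact ⟨y, ys, rfl⟩
  have hfit : br.available.filter (fun x => x.1 == br.port || x.2 == br.port) = y :: ys := hys
  rw [hys, hfit]
  simp only [List.foldl_cons]
  have hpos : 1 ≤ (pvCand br.available br.port y).1 := by
    have := pvBest_nonneg (br.available.erase y) (if y.2 == br.port then y.1 else y.2)
    simp only [pvCand, pvLe] at *
    omega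
  rw [pvMax_zero_of_pos _ hpos]
  calc ys.foldl (fun a x => pvMax a (pvShift c (pvCand br.available br.port x)))
          (pvMax acc (pvShift c (pvCand br.available br.port y)))
      = pvMax acc (ys.foldl (fun a x => pvMax a (pvShift c (pvCand br.available br.port x)))
          (pvShift c (pvCand br.available br.port y))) := pv_foldl_hoist _ _ _ _
    _ = pvMax acc (pvShift c (ys.foldl (fun a x => pvMax a (pvCand br.available br.port x))
          (pvCand br.available br.port y))) := by rw [pv_foldl_shift]

-- loop invariant: pvLoopA returns the second component of the folded maximum
theorem pv_upd_take (maxLen maxStr L S : Int) (h : maxLen < L ∨ (maxLen = L ∧ maxStr < S)) :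
    pvMax (maxLen, maxStr) (L, S) = (L, S) := by
  simp only [pvMax]
  split_ifs
  rfl

theorem pv_upd_keep (maxLen maxStr L S : Int) (h : ¬ (maxLen < L ∨ (maxLen = L ∧ maxStr < S))) :
    pvMax (maxLen, maxStr) (L, S) = (maxLen, maxStr) := by
  simp only [pvMax]
  split_ifs
  rfl

-- loop invariant: pvLoopA returns the second component of the folded maximum
theorem pv_loop_inv (queue : List PvBridge) (maxLen maxStr : Int) :
    pvLoopA queue maxLen maxStr
      = (queue.foldl (fun a br => pvMax a (pvTotal br)) (maxLen, maxStr)).2 := by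
  fun_induction pvLoopA queue maxLen maxStr with
  | case1 maxLen maxStr => rfl
  | case2 maxLen maxStr br rest hempty length hgt ih =>
    have hl : length = (br.bridge.length : Int) := rfl
    have h0 : pvBest br.available br.port = (0, 0) :=
      pvBest_no_fit _ _ (by simpa [pvFitting, List.isEmpty_iff] using hempty)
    have htb : pvTotal br = ((br.bridge.length : Int), pvStrength br.bridge) := by
      simp [pvTotal, h0]
    rw [ih]
    simp only [List.foldl_cons]
    congr 2
    rw [htb, pv_upd_take _ _ _ _ (Or.inl (hl ▸ hgt)), hl]
  | case3 maxLen maxStr br rest hempty length hgt heq s hs ih =>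
    have hl : length = (br.bridge.length : Int) := rfl
    have hs' : s = pvStrength br.bridge := rfl
    have heq' : (br.bridge.length : Int) = maxLen := hl ▸ (by simpa using heq)
    have h0 : pvBest br.available br.port = (0, 0) :=
      pvBest_no_fit _ _ (by simpa [pvFitting, List.isEmpty_iff] using hempty)
    have htb : pvTotal br = ((br.bridge.length : Int), pvStrength br.bridge) := by
      simp [pvTotal, h0]
    rw [ih]
    simp only [List.foldl_cons]
    congr 2
    rw [htb, pv_upd_take _ _ _ _ (Or.inr ⟨heq'.symm, hs' ▸ hs⟩), hl]
  | case4 maxLen maxStr br rest hempty length hgt heq s hs ih =>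
    have hl : length = (br.bridge.length : Int) := rfl
    have hs' : s = pvStrength br.bridge := rfl
    have heq' : (br.bridge.length : Int) = maxLen := hl ▸ (by simpa using heq)
    have hs2 : ¬ pvStrength br.bridge > maxStr := hs' ▸ hs
    have h0 : pvBest br.available br.port = (0, 0) :=
      pvBest_no_fit _ _ (by simpa [pvFitting, List.isEmpty_iff] using hempty)
    have htb : pvTotal br = ((br.bridge.length : Int), pvStrength br.bridge) := by
      simp [pvTotal, h0]
    rw [ih]
    simp only [List.foldl_cons]
    congr 2
    rw [htb, pv_upd_keep _ _ _ _ (by omega)]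
  | case5 maxLen maxStr br rest hempty length hgt heq ih =>
    have hl : length = (br.bridge.length : Int) := rfl
    have hgt2 : ¬ (br.bridge.length : Int) > maxLen := hl ▸ hgt
    have hne2 : ¬ (br.bridge.length : Int) = maxLen := fun h => (hl ▸ heq) (by simpa using h)
    have h0 : pvBest br.available br.port = (0, 0) :=
      pvBest_no_fit _ _ (by simpa [pvFitting, List.isEmpty_iff] using hempty)
    have htb : pvTotal br = ((br.bridge.length : Int), pvStrength br.bridge) := by
      simp [pvTotal, h0]
    rw [ih]
    simp only [List.foldl_cons]
    congr 2
    rw [htb, pv_upd_keep _ _ _ _ (by omega)]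
  | case6 maxLen maxStr br rest hempty ih =>
    have hne : pvFitting br ≠ [] := by simpa [List.isEmpty_iff] using hempty
    rw [ih,
      pv_foldl_perm (fun a br => pvMax a (pvTotal br))
        (fun b a1 a2 => pvMax_rc b (pvTotal a1) (pvTotal a2))
        (List.perm_append_comm (l₁ := rest)
          (l₂ := (pvFitting br).map (fun piece => pvAddPiece br piece))) (maxLen, maxStr),
      List.foldl_append, pv_children_fold br (maxLen, maxStr) hne, List.foldl_cons]

theorem pv_main (pieces : List (Int × Int)) :
    find_strongest_longest pieces = find_strongest_longest_alt pieces := by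
  unfold find_strongest_longest find_strongest_longest_alt
  rw [pv_loop_inv]
  simp only [List.foldl_cons, List.foldl_nil]
  have htot : pvTotal ⟨pieces, [], 0⟩ = pvBest pieces 0 := by
    simp [pvTotal, pvStrength]
  rw [htot]
  exact pvMax_zero_snd _ (pvBest_nonneg pieces 0)

-- ===== VERDICT (by name: the statement is the Claim_ definition above) =====
theorem find_strongest_longest_spec : Claim_equal_find_strongest_longest := by
  intro pieces _
  unfold Spec_find_strongest_longest
  exact pv_main pieces
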